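-- pv_equiv track=rewrite | github.com/hojoungjang/programming-exercises | 1600-말이-되고픈-원숭이/solution.py | solution
-- ===== SOURCE A (Python) =====
-- from collections import deque
--
-- BLOCKED = 1
--
-- NORMAL_MOVES = [(-1,0), (1,0), (0,-1), (0,1)]
--
-- HORSE_MOVES = [(-1,-2), (-2,-1), (-2,1), (-1,2), (1,2), (2,1), (2,-1), (1,-2)]
--
-- def solution(board, max_horse_move_count):
--     rows, cols = len(board), len(board[0])
--     start = (0, 0, max_horse_move_count)
--     end = (rows-1, cols-1)
--
--     queue = deque([start, None])
--     visited = set([start])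
--     moves = 0
--
--     while queue:
--         if queue[0] is None:
--             queue.popleft()
--             if queue:
--                 queue.append(None)
--             moves += 1
--             continue
--
--         r, c, horse_move_count = queue.popleft()
--         if (r, c) == end:
--             return moves
--
--         if horse_move_count > 0:
--             for dr, dc in HORSE_MOVES:
--                 new_r = r + dr
--                 new_c = c + dc
--                 if new_r < 0 or new_r >= rows or new_c < 0 or new_c >= cols:
--                     continue
--
--                 new_state = (new_r, new_c, horse_move_count - 1)
--
--                 if new_state in visited:
--                     continue
--
--                 if board[new_r][new_c] == BLOCKED:
--                     continue
--
--                 visited.add(new_state)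
--                 queue.append(new_state)
--
--         for dr, dc in NORMAL_MOVES:
--             new_r = r + dr
--             new_c = c + dc
--             if new_r < 0 or new_r >= rows or new_c < 0 or new_c >= cols:
--                 continue
--
--             new_state = (new_r, new_c, horse_move_count)
--
--             if new_state in visited:
--                 continue
--
--             if board[new_r][new_c] == BLOCKED:
--                 continue
--
--             visited.add(new_state)
--             queue.append(new_state)
--
--     return -1
-- ===== SOURCE B (Python) =====
-- BLOCKED = 1
--
-- NORMAL_MOVES = [(-1,0), (1,0), (0,-1), (0,1)]
--
-- HORSE_MOVES = [(-1,-2), (-2,-1), (-2,1), (-1,2), (1,2), (2,1), (2,-1), (1,-2)]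
--
-- def solution(board, max_horse_move_count):
--     # queue-free fixpoint iteration: saturate the whole reachable-state set
--     # round by round; the round number is the distance.
--     rows, cols = len(board), len(board[0])
--     reach = {(0, 0, max_horse_move_count)}
--     dist = 0
--     while True:
--         if any(r == rows - 1 and c == cols - 1 for r, c, _h in reach):
--             return dist
--         new = reach \
--             | {(r + dr, c + dc, h - 1) for r, c, h in reach if h > 0
--                for dr, dc in HORSE_MOVES
--                if 0 <= r + dr < rows and 0 <= c + dc < cols
--                and board[r + dr][c + dc] != BLOCKED} \
--             | {(r + dr, c + dc, h) for r, c, h in reach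
--                for dr, dc in NORMAL_MOVES
--                if 0 <= r + dr < rows and 0 <= c + dc < cols
--                and board[r + dr][c + dc] != BLOCKED}
--         if new == reach:
--             return -1
--         reach = new
--         dist += 1
-- ===== Notes on version B (the rewrite author's own statement) =====
-- stated objective: alternative
-- what changed: Replaces A's queue-based BFS (deque with a None level sentinel, visited set, per-state expansion) by queue-free fixpoint iteration: each round saturates the entire reachable-state set with all allowed moves at once, the round counter is the distance, and -1 is returned when the set stops growing.
-- outside the precondition, e.g. on solution([[0, 1], [1]], 0): A returns -1, B returns -1
import Mathlib
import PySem

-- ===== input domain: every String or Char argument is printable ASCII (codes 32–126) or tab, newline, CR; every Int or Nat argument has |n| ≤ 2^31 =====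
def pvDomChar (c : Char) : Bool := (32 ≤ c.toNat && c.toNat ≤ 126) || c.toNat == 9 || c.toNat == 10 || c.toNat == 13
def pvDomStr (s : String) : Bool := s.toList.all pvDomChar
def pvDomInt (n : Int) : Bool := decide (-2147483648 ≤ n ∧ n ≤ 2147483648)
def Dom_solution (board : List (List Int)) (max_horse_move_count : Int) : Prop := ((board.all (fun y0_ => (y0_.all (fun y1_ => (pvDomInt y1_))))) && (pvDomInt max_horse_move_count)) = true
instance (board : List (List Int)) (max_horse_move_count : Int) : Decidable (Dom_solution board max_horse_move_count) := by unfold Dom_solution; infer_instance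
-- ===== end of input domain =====

-- B replaces A's sentinel-deque BFS by queue-free fixpoint iteration over the whole reachable-state
-- set (alternative algorithm, not faster); equal return value on Pre_; neither mutates its arguments.

-- states are (row, col, remaining horse moves)
abbrev pvS : Type := Int × Int × Int

-- module constants shared by both Pythons
def pvNormalMoves : List (Int × Int) := [(-1,0), (1,0), (0,-1), (0,1)]
def pvHorseMoves : List (Int × Int) := [(-1,-2), (-2,-1), (-2,1), (-1,2), (1,2), (2,1), (2,-1), (1,-2)]

-- ===== PORT A =====
-- body of A's `for dr, dc in …` loops: bounds check, visited check, blocked check, then enqueue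
def pvStepA (board : List (List Int)) (rows cols r c nh : Int)
    (acc : PySem.Set pvS × List (Option pvS)) (d : Int × Int) :
    PySem.Set pvS × List (Option pvS) :=
  let new_r := r + d.1
  let new_c := c + d.2
  if new_r < 0 ∨ new_r ≥ rows ∨ new_c < 0 ∨ new_c ≥ cols then acc
  else if (new_r, new_c, nh) ∈ acc.1 then acc
  else if PySem.List.pyGetD (PySem.List.pyGetD board new_r []) new_c 0 = 1 then acc
  else (PySem.Set.add acc.1 (new_r, new_c, nh), acc.2 ++ [some (new_r, new_c, nh)])

-- A's `while queue` loop; `none` in the queue is Python's None level sentinel.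
-- Python has no fuel: the fuel below is termination scaffolding, proved sufficient in solution_spec's chain.
def pvALoop (board : List (List Int)) (rows cols : Int) :
    Nat → List (Option pvS) → PySem.Set pvS → Int → Option Int
  | 0, _, _, _ => none
  | fuel+1, q, visited, moves =>
    match q with
    | [] => some (-1)
    | none :: rest =>
        pvALoop board rows cols fuel (if rest = [] then rest else rest ++ [none]) visited (moves + 1)
    | some (r, c, h) :: rest =>
        if r = rows - 1 ∧ c = cols - 1 then some moves
        else
          let acc1 := if h > 0 then pvHorseMoves.foldl (pvStepA board rows cols r c (h - 1)) (visited, rest)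
                      else (visited, rest)
          let acc2 := pvNormalMoves.foldl (pvStepA board rows cols r c h) acc1
          pvALoop board rows cols fuel acc2.2 acc2.1 moves

def pvFuelA (board : List (List Int)) (k : Int) : Nat :=
  let n := board.length * (PySem.List.pyGetD board 0 []).length * (k.toNat + 1)
  (n + 2) * (n + 2) + 1

def solution (board : List (List Int)) (max_horse_move_count : Int) : Int :=
  let rows : Int := PySem.List.len board
  let cols : Int := PySem.List.len (PySem.List.pyGetD board 0 [])
  let start : pvS := (0, 0, max_horse_move_count)
  (pvALoop board rows cols (pvFuelA board max_horse_move_count)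
      [some start, none] (PySem.Set.ofList [start]) 0).getD 0

-- ===== PORT B =====
-- the combined comprehension filter of B: in bounds and not blocked
abbrev pvGoodP (board : List (List Int)) (rows cols : Int) (s : pvS) : Prop :=
  0 ≤ s.1 ∧ s.1 < rows ∧ 0 ≤ s.2.1 ∧ s.2.1 < cols ∧
    PySem.List.pyGetD (PySem.List.pyGetD board s.1 []) s.2.1 0 ≠ 1

-- B's first set comprehension (horse moves, only from states with charges left)
def pvHorseCands (board : List (List Int)) (rows cols : Int) (reach : PySem.Set pvS) : List pvS :=
  reach.flatMap fun s =>
    if s.2.2 > 0 then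
      pvHorseMoves.filterMap fun d =>
        if pvGoodP board rows cols (s.1 + d.1, s.2.1 + d.2, s.2.2 - 1) then
          some (s.1 + d.1, s.2.1 + d.2, s.2.2 - 1)
        else none
    else []

-- B's second set comprehension (normal moves)
def pvNormalCands (board : List (List Int)) (rows cols : Int) (reach : PySem.Set pvS) : List pvS :=
  reach.flatMap fun s =>
    pvNormalMoves.filterMap fun d =>
      if pvGoodP board rows cols (s.1 + d.1, s.2.1 + d.2, s.2.2) then
        some (s.1 + d.1, s.2.1 + d.2, s.2.2)
      else none

-- B's `new = reach | {…} | {…}` set union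
def pvNew (board : List (List Int)) (rows cols : Int) (reach : PySem.Set pvS) : PySem.Set pvS :=
  PySem.Set.update reach (pvHorseCands board rows cols reach ++ pvNormalCands board rows cols reach)

-- B's `while True` loop; Python has no fuel: the fuel is termination scaffolding, proved sufficient
-- in solution_spec's chain (the set strictly grows every continuing round).
def pvCLoop (board : List (List Int)) (rows cols : Int) :
    Nat → PySem.Set pvS → Int → Option Int
  | 0, _, _ => none
  | fuel+1, reach, dist =>
    if reach.any (fun s => s.1 == rows - 1 && s.2.1 == cols - 1) then some dist
    else
      let new := pvNew board rows cols reach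
      if PySem.Set.equal new reach then some (-1)
      else pvCLoop board rows cols fuel new (dist + 1)

def pvFuelC (board : List (List Int)) (k : Int) : Nat :=
  board.length * (PySem.List.pyGetD board 0 []).length * (k.toNat + 1) + 2

def solution_alt (board : List (List Int)) (max_horse_move_count : Int) : Int :=
  let rows : Int := PySem.List.len board
  let cols : Int := PySem.List.len (PySem.List.pyGetD board 0 [])
  let start : pvS := (0, 0, max_horse_move_count)
  (pvCLoop board rows cols (pvFuelC board max_horse_move_count)
      (PySem.Set.ofList [start]) 0).getD 0

-- ===== PRECONDITION & SPEC =====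
-- Pre_ excludes the empty board and boards having a row shorter than the first row, on which Python A
-- (and B) may raise IndexError; this also excludes some ragged boards whose short rows A never reaches.
def Pre_solution (board : List (List Int)) (max_horse_move_count : Int) : Prop :=
  board ≠ [] ∧ ∀ row ∈ board, (PySem.List.pyGetD board 0 []).length ≤ row.length

instance (board : List (List Int)) (max_horse_move_count : Int) : Decidable (Pre_solution board max_horse_move_count) := by
  unfold Pre_solution; infer_instance

def pvWitness_solution : List (List Int) × Int := ([[0, 0], [0, 0]], 2)

def Spec_solution (board : List (List Int)) (max_horse_move_count : Int) (out : Int) : Prop := out = solution_alt board max_horse_move_count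
instance (board : List (List Int)) (max_horse_move_count : Int) (out : Int) : Decidable (Spec_solution board max_horse_move_count out) := by unfold Spec_solution; infer_instance

-- ===== CLAIM (what is proved, stated in full; the proofs are below) =====
def Claim_equal_solution : Prop := ∀ (board : List (List Int)) (max_horse_move_count : Int), Dom_solution board max_horse_move_count → Pre_solution board max_horse_move_count → Spec_solution board max_horse_move_count (solution board max_horse_move_count)

-- ===== LEMMAS AND PROOFS =====

-- proof-side reference BFS (frontier per level): intermediate between A's sentinel queue and B's closure
def pvCands (r c h : Int) : List pvS :=
  (if h > 0 then pvHorseMoves.map (fun d => (r + d.1, c + d.2, h - 1)) else []) ++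
    pvNormalMoves.map (fun d => (r + d.1, c + d.2, h))

def pvStepB (board : List (List Int)) (rows cols : Int)
    (acc : PySem.Set pvS × List pvS) (cand : pvS) : PySem.Set pvS × List pvS :=
  if 0 ≤ cand.1 ∧ cand.1 < rows ∧ 0 ≤ cand.2.1 ∧ cand.2.1 < cols ∧
      PySem.List.pyGetD (PySem.List.pyGetD board cand.1 []) cand.2.1 0 ≠ 1 ∧ cand ∉ acc.1
  then (PySem.Set.add acc.1 cand, acc.2 ++ [cand]) else acc

def pvExpand (board : List (List Int)) (rows cols dist : Int) :
    List pvS → PySem.Set pvS → List pvS → Sum Int (PySem.Set pvS × List pvS)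
  | [], visited, nxt => .inr (visited, nxt)
  | (r, c, h) :: rest, visited, nxt =>
      if r = rows - 1 ∧ c = cols - 1 then .inl dist
      else
        let acc := (pvCands r c h).foldl (pvStepB board rows cols) (visited, nxt)
        pvExpand board rows cols dist rest acc.1 acc.2

def pvBLoop (board : List (List Int)) (rows cols : Int) :
    Nat → List pvS → PySem.Set pvS → Int → Option Int
  | 0, _, _, _ => none
  | fuel+1, frontier, visited, dist =>
    match frontier with
    | [] => some (-1)
    | _ :: _ =>
      match pvExpand board rows cols dist frontier visited [] with
      | .inl ans => some ans
      | .inr (v', nxt) => pvBLoop board rows cols fuel nxt v' (dist + 1)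

-- the (finite) superset of every state A/B can ever visit: the start plus in-board cells with h ∈ [min k 0, k]
def pvInSpace (rows cols k : Int) (s : pvS) : Prop :=
  0 ≤ s.1 ∧ s.1 < rows ∧ 0 ≤ s.2.1 ∧ s.2.1 < cols ∧ k - (k.toNat : Int) ≤ s.2.2 ∧ s.2.2 ≤ k

def pvOK (start : pvS) (rows cols k : Int) (s : pvS) : Prop := s = start ∨ pvInSpace rows cols k s

-- loop invariant shared by the simulation and the termination argument
def pvInv (start : pvS) (rows cols k : Int) (v : PySem.Set pvS) (fr : List pvS) : Prop :=
  v.Nodup ∧ (∀ s ∈ v, pvOK start rows cols k s) ∧ (∀ s ∈ fr, s ∈ v) ∧ fr.Nodup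

def pvEnc (k : Int) (ri ci hi : Nat) : pvS := ((ri : Int), (ci : Int), k - (hi : Int))

def pvSpaceList (rows cols k : Int) (start : pvS) : List pvS :=
  start :: ((List.range rows.toNat).flatMap fun ri =>
    (List.range cols.toNat).flatMap fun ci =>
      (List.range (k.toNat + 1)).map (pvEnc k ri ci))

theorem pvStepB_fold_delta (board : List (List Int)) (rows cols : Int) :
    ∀ (cs : List pvS) (v : PySem.Set pvS) (nxt : List pvS), v.Nodup →
    ∃ d : List pvS,
      cs.foldl (pvStepB board rows cols) (v, nxt) = (v ++ d, nxt ++ d) ∧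
      (v ++ d).Nodup ∧
      (∀ s ∈ d, s ∈ cs ∧ 0 ≤ s.1 ∧ s.1 < rows ∧ 0 ≤ s.2.1 ∧ s.2.1 < cols) := by
  intro cs
  induction cs with
  | nil => intro v nxt hv; exact ⟨[], by simp, by simpa using hv, by simp⟩
  | cons cand cs ih =>
    intro v nxt hv
    simp only [List.foldl_cons]
    rw [pvStepB]
    split_ifs with hg
    · have hnot : cand ∉ v := hg.2.2.2.2.2
      have hnd : (v ++ [cand]).Nodup :=
        hv.append (List.nodup_singleton _) (by simpa [List.disjoint_singleton] using hnot)
      rw [PySem.Set.add_of_not_mem hnot]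
      obtain ⟨d, hfold, hnd', hprop⟩ := ih (v ++ [cand]) (nxt ++ [cand]) hnd
      refine ⟨cand :: d, ?_, ?_, ?_⟩
      · simpa using hfold
      · simpa using hnd'
      · intro s hs
        rcases List.mem_cons.mp hs with hs | hs
        · subst hs
          exact ⟨List.mem_cons_self, hg.1, hg.2.1, hg.2.2.1, hg.2.2.2.1⟩
        · obtain ⟨h1, h2⟩ := hprop s hs
          exact ⟨List.mem_cons_of_mem _ h1, h2⟩
    · obtain ⟨d, hfold, hnd', hprop⟩ := ih v nxt hv
      refine ⟨d, hfold, hnd', fun s hs => ?_⟩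
      obtain ⟨h1, h2⟩ := hprop s hs
      exact ⟨List.mem_cons_of_mem _ h1, h2⟩

theorem pvCands_ok (start : pvS) (rows cols k : Int) (r c h : Int)
    (hok : pvOK start rows cols k (r, c, h)) (hs : (r, c, h) = start → start.2.2 = k) :
    ∀ s ∈ pvCands r c h, 0 ≤ s.1 → s.1 < rows → 0 ≤ s.2.1 → s.2.1 < cols →
      pvInSpace rows cols k s := by
  have hb : k - (k.toNat : Int) ≤ h ∧ h ≤ k := by
    rcases hok with he | hin
    · have hk : h = k := by have := hs he; rw [← he] at this; exact this
      omega
    · obtain ⟨_, _, _, _, h5, h6⟩ := hin; exact ⟨h5, h6⟩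
  intro s hsmem hb1 hb2 hb3 hb4
  have hh : s.2.2 = h - 1 ∧ 0 < h ∨ s.2.2 = h := by
    by_cases hpos : h > 0
    · simp [pvCands, hpos, pvHorseMoves, pvNormalMoves] at hsmem
      rcases hsmem with h'|h'|h'|h'|h'|h'|h'|h'|h'|h'|h'|h' <;> subst h' <;> simp <;> omega
    · simp [pvCands, hpos, pvNormalMoves] at hsmem
      rcases hsmem with h'|h'|h'|h' <;> subst h' <;> simp
  exact ⟨hb1, hb2, hb3, hb4, by omega, by omega⟩

theorem pvExpand_inr (board : List (List Int)) (rows cols k : Int) (start : pvS)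
    (hstart : start.2.2 = k) :
    ∀ (fr : List pvS) (v : PySem.Set pvS) (nxt : List pvS) (m : Int)
      (v' : PySem.Set pvS) (nxt' : List pvS),
      v.Nodup → (∀ s ∈ v, pvOK start rows cols k s) → (∀ s ∈ fr, s ∈ v) →
      pvExpand board rows cols m fr v nxt = .inr (v', nxt') →
      ∃ d : List pvS, v' = v ++ d ∧ nxt' = nxt ++ d ∧ v'.Nodup ∧
        (∀ s ∈ v', pvOK start rows cols k s) := by
  intro fr
  induction fr with
  | nil =>
    intro v nxt m v' nxt' hnd hok _ hexp
    simp [pvExpand] at hexp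
    exact ⟨[], by simp [← hexp.1], by simp [← hexp.2], by simpa [← hexp.1] using hnd,
      by rw [← hexp.1]; exact hok⟩
  | cons s0 rest ih =>
    obtain ⟨r, c, h⟩ := s0
    intro v nxt m v' nxt' hnd hok hsub hexp
    rw [pvExpand] at hexp
    split at hexp
    · simp at hexp
    · obtain ⟨d0, hfold, hnd0, hprop0⟩ :=
        pvStepB_fold_delta board rows cols (pvCands r c h) v nxt hnd
      rw [hfold] at hexp
      have hok0 : ∀ s ∈ v ++ d0, pvOK start rows cols k s := by
        intro s hs
        rcases List.mem_append.mp hs with hs | hs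
        · exact hok s hs
        · obtain ⟨hc, b1, b2, b3, b4⟩ := hprop0 s hs
          exact Or.inr (pvCands_ok start rows cols k r c h
            (hok _ (hsub _ List.mem_cons_self)) (fun _ => hstart) s hc b1 b2 b3 b4)
      obtain ⟨d1, h1, h2, h3, h4⟩ := ih (v ++ d0) (nxt ++ d0) m v' nxt' hnd0 hok0
        (fun s hs => List.mem_append.mpr (Or.inl (hsub s (List.mem_cons_of_mem _ hs)))) hexp
      exact ⟨d0 ++ d1, by simp [h1], by simp [h2], h3, h4⟩

theorem pvLen_spaceList (rows cols k : Int) (start : pvS) :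
    (pvSpaceList rows cols k start).length = rows.toNat * cols.toNat * (k.toNat + 1) + 1 := by
  simp [pvSpaceList, List.length_flatMap]
  ring

theorem pvCard_bound (rows cols k : Int) (start : pvS) (v : PySem.Set pvS)
    (hnd : v.Nodup) (hok : ∀ s ∈ v, pvOK start rows cols k s) :
    v.length ≤ rows.toNat * cols.toNat * (k.toNat + 1) + 1 := by
  have hsub : v ⊆ pvSpaceList rows cols k start := by
    intro s hs
    rcases hok s hs with rfl | hin
    · exact List.mem_cons_self
    · obtain ⟨b1, b2, b3, b4, b5, b6⟩ := hin
      refine List.mem_cons_of_mem _ ?_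
      have m1 : s.1.toNat ∈ List.range rows.toNat := List.mem_range.mpr (by omega)
      have m2 : s.2.1.toNat ∈ List.range cols.toNat := List.mem_range.mpr (by omega)
      have m3 : (k - s.2.2).toNat ∈ List.range (k.toNat + 1) := List.mem_range.mpr (by omega)
      have hm3 := List.mem_map_of_mem (f := pvEnc k s.1.toNat s.2.1.toNat) m3
      have hm2 := List.mem_flatMap_of_mem
        (f := fun ci => (List.range (k.toNat + 1)).map (pvEnc k s.1.toNat ci)) m2 hm3
      have hmem := List.mem_flatMap_of_mem
        (f := fun ri => (List.range cols.toNat).flatMap fun ci =>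
          (List.range (k.toNat + 1)).map (pvEnc k ri ci)) m1 hm2
      have heq : pvEnc k s.1.toNat s.2.1.toNat (k - s.2.2).toNat = s := by
        obtain ⟨a, b, c⟩ := s
        simp_all only [pvEnc, Prod.mk.injEq]
        refine ⟨by omega, by omega, by omega⟩
      rwa [heq] at hmem
  calc v.length ≤ (pvSpaceList rows cols k start).length :=
        (List.subperm_of_subset hnd hsub).length_le
    _ = _ := pvLen_spaceList rows cols k start

theorem pvStepAB (board : List (List Int)) (rows cols r c nh : Int) (d : Int × Int)
    (v : PySem.Set pvS) (Q : List (Option pvS)) :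
    pvStepA board rows cols r c nh (v, Q) d =
      ((pvStepB board rows cols (v, []) (r + d.1, c + d.2, nh)).1,
       Q ++ ((pvStepB board rows cols (v, []) (r + d.1, c + d.2, nh)).2).map some) := by
  simp only [pvStepA, pvStepB]
  split_ifs <;> simp_all
  omega

theorem pvStepB_shift (board : List (List Int)) (rows cols : Int) :
    ∀ (cs : List pvS) (v : PySem.Set pvS) (L : List pvS),
      cs.foldl (pvStepB board rows cols) (v, L) =
        ((cs.foldl (pvStepB board rows cols) (v, [])).1,
         L ++ (cs.foldl (pvStepB board rows cols) (v, [])).2) := by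
  intro cs
  induction cs with
  | nil => intro v L; simp
  | cons cand cs ih =>
    intro v L
    simp only [List.foldl_cons]
    rw [pvStepB, pvStepB]
    dsimp only
    simp only [List.nil_append]
    split_ifs with hg
    · rw [ih (PySem.Set.add v cand) (L ++ [cand]), ih (PySem.Set.add v cand) [cand]]
      simp
    · exact ih v L

theorem pvFoldA_map (board : List (List Int)) (rows cols r c nh : Int) :
    ∀ (ms : List (Int × Int)) (v : PySem.Set pvS) (Q : List (Option pvS)),
      ms.foldl (pvStepA board rows cols r c nh) (v, Q) =
        (((ms.map fun d => (r + d.1, c + d.2, nh)).foldl (pvStepB board rows cols) (v, [])).1,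
         Q ++ (((ms.map fun d => (r + d.1, c + d.2, nh)).foldl (pvStepB board rows cols) (v, [])).2).map some) := by
  intro ms
  induction ms with
  | nil => intro v Q; simp
  | cons d ms ih =>
    intro v Q
    simp only [List.foldl_cons, List.map_cons]
    rw [pvStepAB]
    rw [ih]
    conv_rhs => rw [pvStepB_shift board rows cols (ms.map fun d => (r + d.1, c + d.2, nh))
      (pvStepB board rows cols (v, []) (r + d.1, c + d.2, nh)).1
      (pvStepB board rows cols (v, []) (r + d.1, c + d.2, nh)).2]
    simp

theorem pvFoldAB (board : List (List Int)) (rows cols r c h : Int)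
    (v : PySem.Set pvS) (Q : List (Option pvS)) :
    (pvNormalMoves.foldl (pvStepA board rows cols r c h)
      (if h > 0 then pvHorseMoves.foldl (pvStepA board rows cols r c (h - 1)) (v, Q) else (v, Q))) =
    (((pvCands r c h).foldl (pvStepB board rows cols) (v, [])).1,
      Q ++ (((pvCands r c h).foldl (pvStepB board rows cols) (v, [])).2).map some) := by
  unfold pvCands
  by_cases hpos : h > 0
  · simp only [hpos, if_pos]
    rw [pvFoldA_map, pvFoldA_map, List.foldl_append]
    conv_rhs =>
      rw [pvStepB_shift board rows cols (pvNormalMoves.map fun d => (r + d.1, c + d.2, h))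
        ((pvHorseMoves.map fun d => (r + d.1, c + d.2, h - 1)).foldl (pvStepB board rows cols) (v, [])).1
        ((pvHorseMoves.map fun d => (r + d.1, c + d.2, h - 1)).foldl (pvStepB board rows cols) (v, [])).2]
    simp
  · simp only [hpos, if_neg, not_false_iff]
    rw [pvFoldA_map]
    simp

theorem pvALoop_mono (board : List (List Int)) (rows cols : Int) :
    ∀ (f f' : Nat) (q : List (Option pvS)) (v : PySem.Set pvS) (m : Int) (r : Int),
      f ≤ f' → pvALoop board rows cols f q v m = some r →
      pvALoop board rows cols f' q v m = some r := by
  intro f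
  induction f with
  | zero => intro f' q v m r _ h; simp [pvALoop] at h
  | succ f ih =>
    intro f' q v m r hle h
    obtain ⟨f'', rfl⟩ : ∃ f'', f' = f'' + 1 := ⟨f' - 1, by omega⟩
    cases q with
    | nil => rw [pvALoop] at h ⊢; exact h
    | cons o rest =>
      cases o with
      | none =>
        rw [pvALoop] at h ⊢
        exact ih f'' _ _ _ _ (by omega) h
      | some s =>
        obtain ⟨r1, c1, h1⟩ := s
        rw [pvALoop] at h ⊢
        dsimp only at h ⊢
        split_ifs at h ⊢
        all_goals first
          | exact h
          | exact ih f'' _ _ _ _ (by omega) h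

theorem pvDrain (board : List (List Int)) (rows cols : Int) :
    ∀ (rest : List pvS) (v : PySem.Set pvS) (nxt : List pvS) (m : Int) (fA : Nat),
      pvALoop board rows cols (rest.length + fA) (rest.map some ++ none :: nxt.map some) v m =
        match pvExpand board rows cols m rest v nxt with
        | .inl ans => some ans
        | .inr (v', nxt') => pvALoop board rows cols fA (none :: nxt'.map some) v' m := by
  intro rest
  induction rest with
  | nil => intro v nxt m fA; simp [pvExpand]
  | cons s0 rest ih =>
    obtain ⟨r, c, h⟩ := s0
    intro v nxt m fA
    have hlen : ((r, c, h) :: rest).length + fA = (rest.length + fA) + 1 := by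
      simp [List.length_cons]; omega
    rw [hlen]
    simp only [List.map_cons, List.cons_append]
    rw [pvALoop]
    rw [pvExpand]
    by_cases hend : (r = rows - 1 ∧ c = cols - 1)
    · rw [if_pos hend, if_pos hend]
    · rw [if_neg hend, if_neg hend]
      dsimp only
      rw [pvFoldAB]
      dsimp only
      rw [pvStepB_shift board rows cols (pvCands r c h) v nxt]
      have harr : (rest.map some ++ none :: nxt.map some) ++
          (((pvCands r c h).foldl (pvStepB board rows cols) (v, [])).2).map some =
          rest.map some ++ none :: (nxt ++ ((pvCands r c h).foldl (pvStepB board rows cols) (v, [])).2).map some := by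
        simp
      rw [harr]
      exact ih _ _ m fA

theorem pvBLoop_isSome (board : List (List Int)) (rows cols k : Int) (start : pvS)
    (hstart : start.2.2 = k) :
    ∀ (f : Nat) (fr : List pvS) (v : PySem.Set pvS) (m : Int),
      v.Nodup → (∀ s ∈ v, pvOK start rows cols k s) → (∀ s ∈ fr, s ∈ v) →
      rows.toNat * cols.toNat * (k.toNat + 1) + 3 ≤ f + v.length →
      (pvBLoop board rows cols f fr v m).isSome := by
  intro f
  induction f with
  | zero =>
    intro fr v m hnd hok _ hfuel
    have := pvCard_bound rows cols k start v hnd hok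
    omega
  | succ f ih =>
    intro fr v m hnd hok hsub hfuel
    cases fr with
    | nil => rw [pvBLoop]; simp
    | cons a fr' =>
      rw [pvBLoop]
      cases hexp : pvExpand board rows cols m (a :: fr') v [] with
      | inl ans => simp
      | inr p =>
        obtain ⟨v1, nxt⟩ := p
        dsimp only
        obtain ⟨d, hv1, hnxt, hnd1, hok1⟩ :=
          pvExpand_inr board rows cols k start hstart (a :: fr') v [] m v1 nxt hnd hok hsub hexp
        have hdsub : ∀ s ∈ nxt, s ∈ v1 := by
          intro s hs; rw [hv1]; rw [hnxt] at hs
          exact List.mem_append.mpr (Or.inr (by simpa using hs))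
        cases hd : d with
        | nil =>
          have hnxtnil : nxt = [] := by simp [hnxt, hd]
          have hvlen : v1.length = v.length := by rw [hv1, hd]; simp
          have hvb := pvCard_bound rows cols k start v hnd hok
          obtain ⟨f0, rfl⟩ : ∃ f0, f = f0 + 1 := ⟨f - 1, by omega⟩
          rw [hnxtnil, pvBLoop]
          simp
        | cons x xs =>
          apply ih nxt v1 (m + 1) hnd1 hok1 hdsub
          have : v1.length = v.length + d.length := by rw [hv1]; simp
          have hdlen : 1 ≤ d.length := by rw [hd]; simp
          omega

theorem pvMain (board : List (List Int)) (rows cols k : Int) (start : pvS)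
    (hstart : start.2.2 = k) :
    ∀ (fB : Nat) (fr : List pvS) (v : PySem.Set pvS) (m : Int) (r : Int),
      pvInv start rows cols k v fr →
      pvBLoop board rows cols fB fr v m = some r →
      pvALoop board rows cols (fB * (rows.toNat * cols.toNat * (k.toNat + 1) + 2) + 1)
        (fr.map some ++ [none]) v m = some r := by
  intro fB
  induction fB with
  | zero => intro fr v m r _ h; simp [pvBLoop] at h
  | succ fB ih =>
    intro fr v m r hinv h
    obtain ⟨hnd, hok, hsub, hfrnd⟩ := hinv
    obtain ⟨N, hN⟩ : ∃ n, rows.toNat * cols.toNat * (k.toNat + 1) = n := ⟨_, rfl⟩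
    rw [hN] at ih ⊢
    have hvb : v.length ≤ N + 1 := hN ▸ pvCard_bound rows cols k start v hnd hok
    have hfr : fr.length ≤ v.length := (List.subperm_of_subset hfrnd hsub).length_le
    cases fr with
    | nil =>
      rw [pvBLoop] at h
      have hr : r = -1 := by simpa using h.symm
      subst hr
      have h2 : 2 ≤ (fB + 1) * (N + 2) := by
        calc (2:Nat) = 1 * 2 := by omega
          _ ≤ (fB + 1) * (N + 2) := Nat.mul_le_mul (by omega) (by omega)
      obtain ⟨t, ht⟩ : ∃ t, (fB + 1) * (N + 2) + 1 = t + 1 + 1 := ⟨(fB + 1) * (N + 2) - 1, by omega⟩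
      simp only [List.map_nil, List.nil_append]
      rw [ht, pvALoop]
      simp [pvALoop]
    | cons a fr' =>
      rw [pvBLoop] at h
      have hqueue : ((a :: fr').map some ++ [none] : List (Option pvS)) =
          (a :: fr').map some ++ none :: (([] : List pvS)).map some := by simp
      have hlenle : (a :: fr').length ≤ N + 1 := le_trans hfr hvb
      have hbig : N + 2 ≤ (fB + 1) * (N + 2) := Nat.le_mul_of_pos_left (N + 2) (by omega)
      obtain ⟨fA, hfa⟩ : ∃ fA, (fB + 1) * (N + 2) + 1 = (a :: fr').length + fA :=
        ⟨(fB + 1) * (N + 2) + 1 - (a :: fr').length, by omega⟩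
      have hexpand : (fB + 1) * (N + 2) = fB * (N + 2) + (N + 2) := by ring
      have hfa2 : fB * (N + 2) + 2 ≤ fA := by omega
      rw [hqueue, hfa, pvDrain]
      cases hexp : pvExpand board rows cols m (a :: fr') v [] with
      | inl ans =>
        rw [hexp] at h
        simpa using h
      | inr p =>
        obtain ⟨v1, nxt⟩ := p
        rw [hexp] at h
        dsimp only
        obtain ⟨d, hv1, hnxt, hnd1, hok1⟩ :=
          pvExpand_inr board rows cols k start hstart (a :: fr') v [] m v1 nxt hnd hok hsub hexp
        have hdsub : ∀ s ∈ nxt, s ∈ v1 := by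
          intro s hs; rw [hv1]; rw [hnxt] at hs
          exact List.mem_append.mpr (Or.inr (by simpa using hs))
        have hnxtnd : nxt.Nodup := by
          rw [hnxt]; simpa using (hv1 ▸ hnd1 : (v ++ d).Nodup).of_append_right
        by_cases hnxte : nxt = []
        · subst hnxte
          obtain ⟨fB0, rfl⟩ : ∃ fB0, fB = fB0 + 1 := by
            cases fB with
            | zero => simp [pvBLoop] at h
            | succ fB0 => exact ⟨fB0, rfl⟩
          have hr : r = -1 := by simp only [pvBLoop, Option.some.injEq] at h; omega
          subst hr
          obtain ⟨t, ht⟩ : ∃ t, fA = t + 1 + 1 := ⟨fA - 2, by omega⟩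
          rw [ht, pvALoop]
          simp [pvALoop]
        · obtain ⟨t, ht⟩ : ∃ t, fA = t + 1 := ⟨fA - 1, by omega⟩
          rw [ht, pvALoop]
          have hne : (nxt.map some : List (Option pvS)) ≠ [] := by simpa using hnxte
          rw [if_neg hne]
          exact pvALoop_mono board rows cols (fB * (N + 2) + 1) t _ _ _ _ (by omega)
            (ih nxt v1 (m + 1) r ⟨hnd1, hok1, hdsub, hnxtnd⟩ h)

-- membership in the visited set after one frontier element's fold
theorem pvStepB_fold_mem (board : List (List Int)) (rows cols : Int) :
    ∀ (cs : List pvS) (v : PySem.Set pvS) (nxt : List pvS) (s : pvS),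
      s ∈ (cs.foldl (pvStepB board rows cols) (v, nxt)).1 ↔
        s ∈ v ∨ (s ∈ cs ∧ pvGoodP board rows cols s) := by
  intro cs
  induction cs with
  | nil => intro v nxt s; simp
  | cons cand cs ih =>
    intro v nxt s
    simp only [List.foldl_cons]
    rw [pvStepB]
    dsimp only
    split_ifs with hg
    · have hgc : pvGoodP board rows cols cand := ⟨hg.1, hg.2.1, hg.2.2.1, hg.2.2.2.1, hg.2.2.2.2.1⟩
      rw [ih, PySem.Set.mem_add]
      constructor
      · rintro ((hs | rfl) | ⟨hs, hG⟩)
        · exact Or.inl hs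
        · exact Or.inr ⟨List.mem_cons_self, hgc⟩
        · exact Or.inr ⟨List.mem_cons_of_mem _ hs, hG⟩
      · rintro (hs | ⟨hs, hG⟩)
        · exact Or.inl (Or.inl hs)
        · rcases List.mem_cons.mp hs with rfl | hs
          · exact Or.inl (Or.inr rfl)
          · exact Or.inr ⟨hs, hG⟩
    · rw [ih]
      constructor
      · rintro (hs | ⟨hs, hG⟩)
        · exact Or.inl hs
        · exact Or.inr ⟨List.mem_cons_of_mem _ hs, hG⟩
      · rintro (hs | ⟨hs, hG⟩)
        · exact Or.inl hs
        · rcases List.mem_cons.mp hs with rfl | hs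
          · -- guard failed but s is good: s must already be visited
            by_cases hv : s ∈ v
            · exact Or.inl hv
            · exact absurd ⟨hG.1, hG.2.1, hG.2.2.1, hG.2.2.2.1, hG.2.2.2.2, hv⟩ hg
          · exact Or.inr ⟨hs, hG⟩

-- characterisation of one full level expansion that did not hit the end cell
theorem pvExpand_inr_mem (board : List (List Int)) (rows cols : Int) :
    ∀ (fr : List pvS) (v : PySem.Set pvS) (nxt : List pvS) (m : Int)
      (v' : PySem.Set pvS) (nxt' : List pvS),
      pvExpand board rows cols m fr v nxt = .inr (v', nxt') →
      (∀ s, s ∈ v' ↔ s ∈ v ∨ ∃ t ∈ fr, s ∈ pvCands t.1 t.2.1 t.2.2 ∧ pvGoodP board rows cols s) ∧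
      (∀ t ∈ fr, ¬(t.1 = rows - 1 ∧ t.2.1 = cols - 1)) := by
  intro fr
  induction fr with
  | nil =>
    intro v nxt m v' nxt' hexp
    simp [pvExpand] at hexp
    exact ⟨by simp [← hexp.1], by simp⟩
  | cons s0 rest ih =>
    obtain ⟨r, c, h⟩ := s0
    intro v nxt m v' nxt' hexp
    rw [pvExpand] at hexp
    split at hexp
    next hend => simp at hexp
    next hend =>
      obtain ⟨hmem, hnoend⟩ := ih _ _ m v' nxt' hexp
      refine ⟨?_, ?_⟩
      · intro s
        rw [hmem s, pvStepB_fold_mem]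
        constructor
        · rintro ((hs | ⟨hc, hG⟩) | ⟨t, ht, hc, hG⟩)
          · exact Or.inl hs
          · exact Or.inr ⟨(r, c, h), List.mem_cons_self, hc, hG⟩
          · exact Or.inr ⟨t, List.mem_cons_of_mem _ ht, hc, hG⟩
        · rintro (hs | ⟨t, ht, hc, hG⟩)
          · exact Or.inl (Or.inl hs)
          · rcases List.mem_cons.mp ht with rfl | ht
            · exact Or.inl (Or.inr ⟨hc, hG⟩)
            · exact Or.inr ⟨t, ht, hc, hG⟩
      · intro t ht
        rcases List.mem_cons.mp ht with rfl | ht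
        · exact hend
        · exact hnoend t ht

-- an expansion that returned early did so at the level's own distance, at an end-cell state
theorem pvExpand_inl (board : List (List Int)) (rows cols : Int) :
    ∀ (fr : List pvS) (v : PySem.Set pvS) (nxt : List pvS) (m a : Int),
      pvExpand board rows cols m fr v nxt = .inl a →
      a = m ∧ ∃ t ∈ fr, t.1 = rows - 1 ∧ t.2.1 = cols - 1 := by
  intro fr
  induction fr with
  | nil => intro v nxt m a hexp; simp [pvExpand] at hexp
  | cons s0 rest ih =>
    obtain ⟨r, c, h⟩ := s0
    intro v nxt m a hexp
    rw [pvExpand] at hexp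
    split at hexp
    next hend =>
      cases hexp
      exact ⟨rfl, (r, c, h), List.mem_cons_self, hend⟩
    next hend =>
      obtain ⟨ha, t, ht, he⟩ := ih _ _ m a hexp
      exact ⟨ha, t, List.mem_cons_of_mem _ ht, he⟩

-- membership in B's saturated set after one round
theorem pvNew_mem (board : List (List Int)) (rows cols : Int) (reach : PySem.Set pvS) (s : pvS) :
    s ∈ pvNew board rows cols reach ↔
      s ∈ reach ∨ ∃ t ∈ reach, s ∈ pvCands t.1 t.2.1 t.2.2 ∧ pvGoodP board rows cols s := by
  rw [pvNew, PySem.Set.mem_update, List.mem_append]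
  constructor
  · rintro (hs | hs | hs)
    · exact Or.inl hs
    · simp only [pvHorseCands, List.mem_flatMap] at hs
      obtain ⟨t, ht, hmem⟩ := hs
      by_cases hp : t.2.2 > 0
      · rw [if_pos hp] at hmem
        simp only [List.mem_filterMap] at hmem
        obtain ⟨d, hd, hsome⟩ := hmem
        split_ifs at hsome with hG
        cases hsome
        refine Or.inr ⟨t, ht, ?_, hG⟩
        simp only [pvCands, List.mem_append, List.mem_map]
        exact Or.inl (by rw [if_pos hp]; exact List.mem_map.mpr ⟨d, hd, rfl⟩)
      · rw [if_neg hp] at hmem; simp at hmem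
    · simp only [pvNormalCands, List.mem_flatMap] at hs
      obtain ⟨t, ht, hmem⟩ := hs
      simp only [List.mem_filterMap] at hmem
      obtain ⟨d, hd, hsome⟩ := hmem
      split_ifs at hsome with hG
      cases hsome
      refine Or.inr ⟨t, ht, ?_, hG⟩
      simp only [pvCands, List.mem_append]
      exact Or.inr (List.mem_map.mpr ⟨d, hd, rfl⟩)
  · rintro (hs | ⟨t, ht, hc, hG⟩)
    · exact Or.inl hs
    · simp only [pvCands, List.mem_append] at hc
      rcases hc with hc | hc
      · by_cases hp : t.2.2 > 0
        · rw [if_pos hp] at hc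
          obtain ⟨d, hd, rfl⟩ := List.mem_map.mp hc
          refine Or.inr (Or.inl ?_)
          simp only [pvHorseCands, List.mem_flatMap]
          refine ⟨t, ht, ?_⟩
          rw [if_pos hp]
          exact List.mem_filterMap.mpr ⟨d, hd, by rw [if_pos hG]⟩
        · rw [if_neg hp] at hc; simp at hc
      · obtain ⟨d, hd, rfl⟩ := List.mem_map.mp hc
        refine Or.inr (Or.inr ?_)
        simp only [pvNormalCands, List.mem_flatMap]
        exact ⟨t, ht, List.mem_filterMap.mpr ⟨d, hd, by rw [if_pos hG]⟩⟩

-- the closure loop simulates the frontier BFS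
theorem pvFC (board : List (List Int)) (rows cols k : Int) :
    ∀ (f : Nat) (fr : List pvS) (v reach : PySem.Set pvS) (dist r : Int) (g : Nat),
      v.Nodup → reach.Nodup →
      (∀ s, s ∈ v ↔ s ∈ reach) →
      (∀ s ∈ fr, s ∈ v) →
      (∀ s ∈ v, pvOK (0, 0, k) rows cols k s) →
      (∀ s ∈ v, s ∉ fr → ∀ t, t ∈ pvCands s.1 s.2.1 s.2.2 → pvGoodP board rows cols t → t ∈ v) →
      (∀ s ∈ v, s ∉ fr → ¬(s.1 = rows - 1 ∧ s.2.1 = cols - 1)) →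
      rows.toNat * cols.toNat * (k.toNat + 1) + 3 ≤ g + reach.length →
      pvBLoop board rows cols f fr v dist = some r →
      pvCLoop board rows cols g reach dist = some r := by
  intro f
  induction f with
  | zero => intro fr v reach dist r g _ _ _ _ _ _ _ _ h; simp [pvBLoop] at h
  | succ f ih =>
    intro fr v reach dist r g hnd hrnd hvr hsub hok hclosed hnoend hfuel h
    have hreachlen : reach.length ≤ rows.toNat * cols.toNat * (k.toNat + 1) + 1 :=
      pvCard_bound rows cols k (0, 0, k) reach hrnd
        (fun s hs => hok s ((hvr s).mpr hs))
    obtain ⟨g0, rfl⟩ : ∃ g0, g = g0 + 1 := ⟨g - 1, by omega⟩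
    cases fr with
    | nil =>
      rw [pvBLoop] at h
      have hr : r = -1 := by simpa using h.symm
      subst hr
      have hnoendv : ∀ s ∈ v, ¬(s.1 = rows - 1 ∧ s.2.1 = cols - 1) := by
        intro s hs; exact hnoend s hs (by simp)
      rw [pvCLoop]
      rw [if_neg]
      · rw [if_pos]
        rw [PySem.Set.equal_iff]
        intro x
        rw [pvNew_mem]
        constructor
        · rintro (hx | ⟨t, ht, hc, hG⟩)
          · exact hx
          · exact (hvr x).mp (hclosed t ((hvr t).mpr ht) (by simp) x hc hG)
        · exact Or.inl
      · simp only [List.any_eq_true, not_exists, not_and, Bool.and_eq_true, beq_iff_eq]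
        push Not
        intro s hs
        have := hnoendv s ((hvr s).mpr hs)
        tauto
    | cons a fr' =>
      rw [pvBLoop] at h
      cases hexp : pvExpand board rows cols dist (a :: fr') v [] with
      | inl ans =>
        rw [hexp] at h
        obtain ⟨rfl, t, ht, hte⟩ := pvExpand_inl board rows cols _ _ _ _ _ hexp
        have hr : r = ans := by simpa using h.symm
        subst hr
        rw [pvCLoop, if_pos]
        simp only [List.any_eq_true, Bool.and_eq_true, beq_iff_eq]
        exact ⟨t, (hvr t).mp (hsub t ht), hte.1, hte.2⟩
      | inr p =>
        obtain ⟨v1, nxt⟩ := p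
        rw [hexp] at h
        obtain ⟨hmem1, hnoendfr⟩ := pvExpand_inr_mem board rows cols _ _ _ _ _ _ hexp
        obtain ⟨d, hv1, hnxt, hnd1, hok1⟩ :=
          pvExpand_inr board rows cols k (0, 0, k) rfl (a :: fr') v [] dist v1 nxt hnd hok hsub hexp
        have hnxtd : nxt = d := by simpa using hnxt
        have hnoendall : ∀ s ∈ v, ¬(s.1 = rows - 1 ∧ s.2.1 = cols - 1) := by
          intro s hs
          by_cases hf : s ∈ a :: fr'
          · exact hnoendfr s hf
          · exact hnoend s hs hf
        have hanyfalse : (reach.any fun s => s.1 == rows - 1 && s.2.1 == cols - 1) = false := by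
          simp only [List.any_eq_false, Bool.and_eq_true, beq_iff_eq, not_and]
          intro s hs
          have := hnoendall s ((hvr s).mpr hs)
          tauto
        -- membership equivalence between v1 and B's saturated set
        have hmemnew : ∀ s, s ∈ v1 ↔ s ∈ pvNew board rows cols reach := by
          intro s
          rw [hmem1 s, pvNew_mem]
          constructor
          · rintro (hs | ⟨t, ht, hc, hG⟩)
            · exact Or.inl ((hvr s).mp hs)
            · exact Or.inr ⟨t, (hvr t).mp (hsub t ht), hc, hG⟩
          · rintro (hs | ⟨t, ht, hc, hG⟩)
            · exact Or.inl ((hvr s).mpr hs)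
            · by_cases hf : t ∈ a :: fr'
              · exact Or.inr ⟨t, hf, hc, hG⟩
              · exact Or.inl (hclosed t ((hvr t).mpr ht) hf s hc hG)
        rw [pvCLoop, if_neg (by simp [hanyfalse])]
        by_cases hde : d = []
        · -- no new state: both sides stop at -1
          subst hde
          have hv1v : v1 = v := by simpa using hv1
          have heq : PySem.Set.equal (pvNew board rows cols reach) reach = true := by
            rw [PySem.Set.equal_iff]
            intro x
            constructor
            · intro hx
              have hx1 : x ∈ v1 := (hmemnew x).mpr hx
              rw [hv1v] at hx1
              exact (hvr x).mp hx1
            · intro hx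
              rw [pvNew_mem]
              exact Or.inl hx
          rw [if_pos heq]
          -- h : pvBLoop f [] v (dist+1) = some r, so r = -1
          rw [hnxtd] at h
          cases f with
          | zero => simp [pvBLoop] at h
          | succ f0 =>
            have hr : r = -1 := by
              have := h.symm
              simp [pvBLoop] at this
              omega
            rw [hr]
        · -- strict growth: recurse
          have hnewnd : (pvNew board rows cols reach).Nodup := PySem.Set.nodup_update _ _ hrnd
          have hreachsubnew : ∀ x ∈ reach, x ∈ pvNew board rows cols reach := by
            intro x hx; rw [pvNew_mem]; exact Or.inl hx
          obtain ⟨x, hx⟩ : ∃ x, x ∈ d := by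
            cases d with | nil => exact absurd rfl hde | cons y ys => exact ⟨y, List.mem_cons_self⟩
          have hxv1 : x ∈ v1 := by rw [hv1]; exact List.mem_append.mpr (Or.inr hx)
          have hxnv : x ∉ v := by
            have : (v ++ d).Nodup := hv1 ▸ hnd1
            intro hxv
            exact (List.disjoint_of_nodup_append this) hxv hx
          have hxnreach : x ∉ reach := fun hxr => hxnv ((hvr x).mpr hxr)
          have hxnew : x ∈ pvNew board rows cols reach := (hmemnew x).mp hxv1
          have hgrow : reach.length + 1 ≤ (pvNew board rows cols reach).length := by
            have hsubp : (reach ++ [x]).Subperm (pvNew board rows cols reach) := by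
              apply List.subperm_of_subset
              · exact hrnd.append (List.nodup_singleton _)
                  (by simpa [List.disjoint_singleton] using hxnreach)
              · intro y hy
                rcases List.mem_append.mp hy with hy | hy
                · exact hreachsubnew y hy
                · rw [List.mem_singleton.mp hy]; exact hxnew
            have := hsubp.length_le
            simpa using this
          rw [if_neg]
          · rw [hnxtd] at h
            apply ih d v1 (pvNew board rows cols reach) (dist + 1) r g0 hnd1 hnewnd hmemnew
              (fun s hs => hv1 ▸ List.mem_append.mpr (Or.inr hs)) hok1
              ?_ ?_ (by omega) h
            · -- closedness for the next round
              intro s hs hsnotd t htc htG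
              have hsv : s ∈ v := by
                rw [hv1] at hs
                rcases List.mem_append.mp hs with hs | hs
                · exact hs
                · exact absurd hs hsnotd
              by_cases hf : s ∈ a :: fr'
              · -- s was just expanded: its good candidates are all in v1
                rw [hmem1 t]
                exact Or.inr ⟨s, hf, htc, htG⟩
              · exact hv1 ▸ List.mem_append.mpr (Or.inl (hclosed s hsv hf t htc htG))
            · intro s hs hsnotd
              have hsv : s ∈ v := by
                rw [hv1] at hs
                rcases List.mem_append.mp hs with hs | hs
                · exact hs
                · exact absurd hs hsnotd
              exact hnoendall s hsv
          · intro heq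
            rw [PySem.Set.equal_iff] at heq
            exact hxnreach ((heq x).mp hxnew)

-- ===== VERDICT (by name: the statement is the Claim_ definition above) =====
theorem solution_spec : Claim_equal_solution := by
  intro board K _ _
  unfold Spec_solution solution solution_alt pvFuelA pvFuelC
  dsimp only
  have hrows : (PySem.List.len board).toNat = board.length := by
    simp [PySem.List.len_eq]
  have hcols : (PySem.List.len (PySem.List.pyGetD board 0 [])).toNat =
      (PySem.List.pyGetD board 0 []).length := by
    simp [PySem.List.len_eq]
  set rows := PySem.List.len board with hrowsdef
  set cols := PySem.List.len (PySem.List.pyGetD board 0 []) with hcolsdef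
  set start : pvS := ((0 : Int), (0 : Int), K) with hstartdef
  set N := board.length * (PySem.List.pyGetD board 0 []).length * (K.toNat + 1) with hNdef
  have hNeq : rows.toNat * cols.toNat * (K.toNat + 1) = N := by rw [hrows, hcols]
  have hv : PySem.Set.ofList [start] = [start] :=
    PySem.Set.ofList_eq_self_of_nodup [start] (List.nodup_singleton _)
  rw [hv]
  have hinv : pvInv start rows cols K [start] [start] := by
    refine ⟨List.nodup_singleton _, ?_, ?_, List.nodup_singleton _⟩
    · intro s hs; rw [List.mem_singleton] at hs; exact Or.inl hs
    · intro s hs; exact hs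
  have hsome := pvBLoop_isSome board rows cols K start rfl (N + 2) [start] [start] 0
    hinv.1 hinv.2.1 hinv.2.2.1 (by rw [hNeq]; simp)
  obtain ⟨r, hr⟩ := Option.isSome_iff_exists.mp hsome
  have hA := pvMain board rows cols K start rfl (N + 2) [start] [start] 0 r hinv hr
  rw [hNeq] at hA
  have hq : ([start].map some ++ [none] : List (Option pvS)) = [some start, none] := by simp
  rw [hq] at hA
  have hC := pvFC board rows cols K (N + 2) [start] [start] [start] 0 r (N + 2)
    (List.nodup_singleton _) (List.nodup_singleton _) (fun s => Iff.rfl)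
    (fun s hs => hs) hinv.2.1
    (fun s hs hns => absurd hs hns)
    (fun s hs hns => absurd hs hns)
    (by rw [hNeq]; simp) hr
  rw [hA, hC]
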